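-- pv_equiv track=rewrite | github.com/dave-pelletier/calcrostic_generator | calcrostic_generator.py | _has_any_mirrored_ops
-- ===== SOURCE A (Python) =====
-- def _six_lines_from_grid(grid, row_ops, col_ops):
--     """Return the 6 equations as (A, op, B, C)."""
--     lines = []
--     # rows
--     for r in range(3):
--         lines.append((grid[r][0], row_ops[r], grid[r][1], grid[r][2]))
--     # cols
--     for c in range(3):
--         lines.append((grid[0][c], col_ops[c], grid[1][c], grid[2][c]))
--     return lines
--
-- def _are_mirrored(line1, line2) -> bool:
--     """
--     Reject paired equations that restate the same fact:
--       - x + y = z   with   z - x = y   OR   z - y = x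
--       - x x y = z   with   z / x = y   OR   z / y = x
--     Comparison is on numeric values, not positions.
--     """
--     A1, op1, B1, C1 = line1
--     A2, op2, B2, C2 = line2
--
--     s1 = {A1, B1, C1}
--     s2 = {A2, B2, C2}
--     if s1 != s2:
--         return False
--
--     # + vs -
--     if op1 == "+" and op2 == "-":
--         return (C2 - A2 == B2) or (C2 - B2 == A2)
--     if op2 == "+" and op1 == "-":
--         return (C1 - A1 == B1) or (C1 - B1 == A1)
--
--     # x vs /
--     if op1 == "x" and op2 == "/":
--         # z / x = y  or z / y = x
--         if A2 != 0 and C2 == A2 * B2 and B2 != 0: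
--             return (C2 // A2 == B2) or (C2 // B2 == A2)
--         return False
--     if op2 == "x" and op1 == "/":
--         if A1 != 0 and C1 == A1 * B1 and B1 != 0:
--             return (C1 // A1 == B1) or (C1 // B1 == A1)
--         return False
--
--     return False
--
-- def _has_any_mirrored_ops(grid, row_ops, col_ops) -> bool:
--     lines = _six_lines_from_grid(grid, row_ops, col_ops)
--     n = len(lines)
--     for i in range(n):
--         for j in range(i+1, n):
--             if _are_mirrored(lines[i], lines[j]):
--                 return True
--     return False
-- ===== SOURCE B (Python) =====
-- def _has_any_mirrored_ops(grid, row_ops, col_ops):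
--     # Build the six equations: three rows, then the three columns of the 3x3 block.
--     rows3 = [r[:3] for r in grid[:3]]
--     eqs = [(r[0], op, r[1], r[2]) for r, op in zip(rows3, row_ops[:3])]
--     eqs += [(c[0], op, c[1], c[2]) for c, op in zip(zip(*rows3), col_ops[:3])]
--     # One classification pass: bucket the operand triples by operator.
--     plus, minus, times, div = [], [], [], []
--     for a, op, b, c in eqs:
--         if op == "+":
--             plus.append((a, b, c))
--         elif op == "-":
--             minus.append((a, b, c))
--         elif op == "x":
--             times.append((a, b, c))
--         elif op == "/":
--             div.append((a, b, c))
--     # A '+' equation mirrors a '-' equation with the same value set whose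
--     # subtraction restates the addition; likewise 'x' against '/'.
--     for p in plus:
--         s = frozenset(p)
--         for (a, b, c) in minus:
--             if frozenset((a, b, c)) == s and (c - a == b or c - b == a):
--                 return True
--     for t in times:
--         s = frozenset(t)
--         for (a, b, c) in div:
--             if frozenset((a, b, c)) == s and a != 0 and c == a * b and b != 0 \
--                     and (c // a == b or c // b == a):
--                 return True
--     return False
-- ===== Notes on version B (the rewrite author's own statement) =====
-- stated objective: alternative
-- what changed: Instead of A's flat scan over all 15 unordered pairs of the six equations with per-pair operator dispatch, B makes one classification pass bucketing the operand triples by operator and then applies the directed mirror test only on the plus-by-minus and times-by-div cross products.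
import Mathlib
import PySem

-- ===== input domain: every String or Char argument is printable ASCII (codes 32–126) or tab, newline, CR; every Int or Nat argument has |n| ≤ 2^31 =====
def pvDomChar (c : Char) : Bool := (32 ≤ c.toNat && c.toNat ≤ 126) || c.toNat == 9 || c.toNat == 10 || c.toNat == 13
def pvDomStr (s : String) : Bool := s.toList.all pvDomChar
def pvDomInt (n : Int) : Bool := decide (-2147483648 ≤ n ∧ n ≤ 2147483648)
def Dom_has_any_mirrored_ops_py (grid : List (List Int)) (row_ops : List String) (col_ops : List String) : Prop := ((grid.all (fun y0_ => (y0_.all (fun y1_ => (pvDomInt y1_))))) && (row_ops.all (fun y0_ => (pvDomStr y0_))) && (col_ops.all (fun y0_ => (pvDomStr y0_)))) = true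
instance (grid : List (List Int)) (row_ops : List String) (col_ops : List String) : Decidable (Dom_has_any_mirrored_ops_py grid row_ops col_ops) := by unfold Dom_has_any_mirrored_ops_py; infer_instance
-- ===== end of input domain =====

-- B replaces A's flat scan over all 15 pairs of equations (with per-pair operator
-- dispatch) by one classification pass bucketing the operand triples by operator,
-- followed by the mirror test on the plus×minus and times×div cross products only
-- (objective: alternative decomposition, same cost on the fixed six equations).

-- ===== PORT A =====
-- grid[r] / xs[i] with .getD: Python raises IndexError exactly where pyGet? is none;
-- those inputs are excluded by Pre_, so the defaults are never reached there.
def pvRowA (grid : List (List Int)) (r : Int) : List Int := (PySem.List.pyGet? grid r).getD []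
def pvIntA (xs : List Int) (i : Int) : Int := (PySem.List.pyGet? xs i).getD 0
def pvStrA (xs : List String) (i : Int) : String := (PySem.List.pyGet? xs i).getD ""

-- port of _six_lines_from_grid
def sixLinesA (grid : List (List Int)) (row_ops : List String) (col_ops : List String) :
    List (Int × String × Int × Int) :=
  let lines := (PySem.List.pyRange 0 3 1).foldl (fun acc r =>
    acc ++ [(pvIntA (pvRowA grid r) 0, pvStrA row_ops r, pvIntA (pvRowA grid r) 1,
             pvIntA (pvRowA grid r) 2)]) []
  (PySem.List.pyRange 0 3 1).foldl (fun acc c =>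
    acc ++ [(pvIntA (pvRowA grid 0) c, pvStrA col_ops c, pvIntA (pvRowA grid 1) c,
             pvIntA (pvRowA grid 2) c)]) lines

-- port of _are_mirrored
def areMirroredA (line1 line2 : Int × String × Int × Int) : Bool :=
  let (A1, op1, B1, C1) := line1
  let (A2, op2, B2, C2) := line2
  let s1 : PySem.Set Int := PySem.Set.ofList [A1, B1, C1]
  let s2 : PySem.Set Int := PySem.Set.ofList [A2, B2, C2]
  if ¬ (PySem.Set.equal s1 s2 = true) then false
  else if op1 = "+" ∧ op2 = "-" then decide (C2 - A2 = B2) || decide (C2 - B2 = A2)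
  else if op2 = "+" ∧ op1 = "-" then decide (C1 - A1 = B1) || decide (C1 - B1 = A1)
  else if op1 = "x" ∧ op2 = "/" then
    (if A2 ≠ 0 ∧ C2 = A2 * B2 ∧ B2 ≠ 0 then
      decide (PySem.Int.floordiv C2 A2 = B2) || decide (PySem.Int.floordiv C2 B2 = A2)
     else false)
  else if op2 = "x" ∧ op1 = "/" then
    (if A1 ≠ 0 ∧ C1 = A1 * B1 ∧ B1 ≠ 0 then
      decide (PySem.Int.floordiv C1 A1 = B1) || decide (PySem.Int.floordiv C1 B1 = A1)
     else false)
  else false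

-- the nested for-loops of _has_any_mirrored_ops (return True = List.any)
def pairScanA (lines : List (Int × String × Int × Int)) : Bool :=
  let n : Int := lines.length
  (PySem.List.pyRange 0 n 1).any (fun i =>
    (PySem.List.pyRange (i + 1) n 1).any (fun j =>
      areMirroredA ((PySem.List.pyGet? lines i).getD (0, "", 0, 0))
                   ((PySem.List.pyGet? lines j).getD (0, "", 0, 0))))

def has_any_mirrored_ops_py (grid : List (List Int)) (row_ops : List String) (col_ops : List String) : Bool :=
  pairScanA (sixLinesA grid row_ops col_ops)

-- ===== PORT B =====
-- r[0], r[1], r[2] of a row known (under Pre_) to have ≥ 3 entries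
def pvTripleB (r : List Int) : Int × Int × Int :=
  match r with
  | a :: b :: c :: _ => (a, b, c)
  | _ => (0, 0, 0)

-- zip(*rows3) for the three-row case reached under Pre_ (exact there)
def pvZip3B (rs : List (List Int)) : List (Int × Int × Int) :=
  match rs with
  | [r0, r1, r2] => r0.zip (r1.zip r2)
  | _ => []

-- the two comprehensions building eqs
def eqsB (grid : List (List Int)) (row_ops : List String) (col_ops : List String) :
    List (Int × String × Int × Int) :=
  let rows3 := (grid.take 3).map (List.take 3)
  let rowEqs := (rows3.zip (row_ops.take 3)).map (fun p =>
    ((pvTripleB p.1).1, p.2, (pvTripleB p.1).2.1, (pvTripleB p.1).2.2))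
  let colEqs := ((pvZip3B rows3).zip (col_ops.take 3)).map (fun p =>
    (p.1.1, p.2, p.1.2.1, p.1.2.2))
  rowEqs ++ colEqs

-- the classification pass: bucket the operand triples by operator
def classifyB (eqs : List (Int × String × Int × Int)) :
    List (Int × Int × Int) × List (Int × Int × Int) × List (Int × Int × Int) × List (Int × Int × Int) :=
  eqs.foldl (fun acc l =>
    if l.2.1 = "+" then (acc.1 ++ [(l.1, l.2.2.1, l.2.2.2)], acc.2.1, acc.2.2.1, acc.2.2.2)
    else if l.2.1 = "-" then (acc.1, acc.2.1 ++ [(l.1, l.2.2.1, l.2.2.2)], acc.2.2.1, acc.2.2.2)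
    else if l.2.1 = "x" then (acc.1, acc.2.1, acc.2.2.1 ++ [(l.1, l.2.2.1, l.2.2.2)], acc.2.2.2)
    else if l.2.1 = "/" then (acc.1, acc.2.1, acc.2.2.1, acc.2.2.2 ++ [(l.1, l.2.2.1, l.2.2.2)])
    else acc) ([], [], [], [])

-- body of the plus/minus inner loop
def minusMirrorB (p m : Int × Int × Int) : Bool :=
  let (a, b, c) := m
  PySem.Set.equal (PySem.Set.ofList [a, b, c]) (PySem.Set.ofList [p.1, p.2.1, p.2.2]) &&
    (decide (c - a = b) || decide (c - b = a))

-- body of the times/div inner loop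
def divMirrorB (t d : Int × Int × Int) : Bool :=
  let (a, b, c) := d
  PySem.Set.equal (PySem.Set.ofList [a, b, c]) (PySem.Set.ofList [t.1, t.2.1, t.2.2]) &&
    decide (a ≠ 0) && decide (c = a * b) && decide (b ≠ 0) &&
    (decide (PySem.Int.floordiv c a = b) || decide (PySem.Int.floordiv c b = a))

def has_any_mirrored_ops_py_alt (grid : List (List Int)) (row_ops : List String) (col_ops : List String) : Bool :=
  let buckets := classifyB (eqsB grid row_ops col_ops)
  buckets.1.any (fun p => buckets.2.1.any (fun m => minusMirrorB p m)) ||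
    buckets.2.2.1.any (fun t => buckets.2.2.2.any (fun d => divMirrorB t d))

-- ===== PRECONDITION & SPEC =====
-- Pre_ = exactly the inputs where A's indexing succeeds (grid[0..2][0..2], row_ops[0..2],
-- col_ops[0..2] all exist); elsewhere Python A raises IndexError.
def Pre_has_any_mirrored_ops_py (grid : List (List Int)) (row_ops : List String) (col_ops : List String) : Prop :=
  3 ≤ grid.length ∧ 3 ≤ row_ops.length ∧ 3 ≤ col_ops.length ∧ ∀ r ∈ grid.take 3, 3 ≤ r.length
instance (grid : List (List Int)) (row_ops : List String) (col_ops : List String) : Decidable (Pre_has_any_mirrored_ops_py grid row_ops col_ops) := by unfold Pre_has_any_mirrored_ops_py; infer_instance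

def pvWitness_has_any_mirrored_ops_py : List (List Int) × List String × List String :=
  ([[1, 2, 3], [4, 5, 6], [7, 8, 9]], ["+", "-", "x"], ["+", "-", "/"])

def Spec_has_any_mirrored_ops_py (grid : List (List Int)) (row_ops : List String) (col_ops : List String) (out : Bool) : Prop := out = has_any_mirrored_ops_py_alt grid row_ops col_ops
instance (grid : List (List Int)) (row_ops : List String) (col_ops : List String) (out : Bool) : Decidable (Spec_has_any_mirrored_ops_py grid row_ops col_ops out) := by unfold Spec_has_any_mirrored_ops_py; infer_instance

-- ===== CLAIM (what is proved, stated in full; the proofs are below) =====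
def Claim_equal_has_any_mirrored_ops_py : Prop := ∀ (grid : List (List Int)) (row_ops : List String) (col_ops : List String), Dom_has_any_mirrored_ops_py grid row_ops col_ops → Pre_has_any_mirrored_ops_py grid row_ops col_ops → Spec_has_any_mirrored_ops_py grid row_ops col_ops (has_any_mirrored_ops_py grid row_ops col_ops)

-- ===== LEMMAS AND PROOFS =====

-- a pair (x, y) of a '+' equation and a '-' equation passing B's plus/minus test
def gP (x y : Int × String × Int × Int) : Bool :=
  (x.2.1 == "+") && ((y.2.1 == "-") && minusMirrorB (x.1, x.2.2.1, x.2.2.2) (y.1, y.2.2.1, y.2.2.2))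

-- a pair (x, y) of an 'x' equation and a '/' equation passing B's times/div test
def gX (x y : Int × String × Int × Int) : Bool :=
  (x.2.1 == "x") && ((y.2.1 == "/") && divMirrorB (x.1, x.2.2.1, x.2.2.2) (y.1, y.2.2.1, y.2.2.2))

theorem setEqual_comm (s t : PySem.Set Int) : PySem.Set.equal s t = PySem.Set.equal t s := by
  rw [Bool.eq_iff_iff, PySem.Set.equal_iff, PySem.Set.equal_iff]
  constructor <;> intro h x <;> exact (h x).symm

-- A's per-pair test, decomposed into B's two directed tests in both orders
theorem mir_decomp (x y : Int × String × Int × Int) :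
    areMirroredA x y = (gP x y || gP y x || gX x y || gX y x) := by
  obtain ⟨a1, o1, b1, c1⟩ := x
  obtain ⟨a2, o2, b2, c2⟩ := y
  simp only [areMirroredA, gP, gX, minusMirrorB, divMirrorB]
  rw [setEqual_comm (PySem.Set.ofList [a2, b2, c2])]
  by_cases he : PySem.Set.equal (PySem.Set.ofList [a1, b1, c1]) (PySem.Set.ofList [a2, b2, c2]) = true
  · rw [if_neg (by simp [he])]
    split_ifs with h1 h2 h3 h4 <;> simp_all [beq_iff_eq]
  · simp [he]

theorem gP_self (x : Int × String × Int × Int) : gP x x = false := by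
  simp only [gP]
  by_cases h : x.2.1 = "+" <;> simp [h]

theorem gX_self (x : Int × String × Int × Int) : gX x x = false := by
  simp only [gX]
  by_cases h : x.2.1 = "x" <;> simp [h]

theorem any_or {α : Type} (l : List α) (f g : α → Bool) :
    l.any (fun y => f y || g y) = (l.any f || l.any g) := by
  induction l with
  | nil => rfl
  | cons x xs ih => simp only [List.any_cons, ih]; cases f x <;> cases g x <;> simp

theorem and_any {α : Type} (b : Bool) (l : List α) (f : α → Bool) :
    (b && l.any f) = l.any (fun y => b && f y) := by
  cases b <;> simp

-- A's i<j double loop as structural recursion on the line list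
def pairStruct : List (Int × String × Int × Int) → Bool
  | [] => false
  | x :: xs => xs.any (areMirroredA x) || pairStruct xs

-- the heart of the proof: the i<j scan of A's test equals the full double scan of
-- B's directed tests (the diagonal vanishes because no equation has two operators)
theorem key (L : List (Int × String × Int × Int)) :
    pairStruct L = (L.any (fun x => L.any (gP x)) || L.any (fun x => L.any (gX x))) := by
  induction L with
  | nil => rfl
  | cons x xs ih =>
    simp only [pairStruct, ih, List.any_cons, gP_self, gX_self, Bool.false_or]
    have hm : (fun y => areMirroredA x y) = fun y => gP x y || (gP y x || (gX x y || gX y x)) := by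
      funext y; rw [mir_decomp]; simp [Bool.or_assoc]
    rw [show xs.any (areMirroredA x) = xs.any (fun y => gP x y || (gP y x || (gX x y || gX y x))) from by rw [← hm]]
    simp only [any_or]
    rw [Bool.eq_iff_iff]
    simp only [Bool.or_eq_true]
    tauto

-- the classification loop from any accumulator appends the four filtered projections
def selOp (op : String) (eqs : List (Int × String × Int × Int)) : List (Int × Int × Int) :=
  eqs.filterMap (fun l => if l.2.1 = op then some (l.1, l.2.2.1, l.2.2.2) else none)

theorem classify_aux (eqs : List (Int × String × Int × Int))
    (p m t d : List (Int × Int × Int)) :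
    eqs.foldl (fun acc l =>
      if l.2.1 = "+" then (acc.1 ++ [(l.1, l.2.2.1, l.2.2.2)], acc.2.1, acc.2.2.1, acc.2.2.2)
      else if l.2.1 = "-" then (acc.1, acc.2.1 ++ [(l.1, l.2.2.1, l.2.2.2)], acc.2.2.1, acc.2.2.2)
      else if l.2.1 = "x" then (acc.1, acc.2.1, acc.2.2.1 ++ [(l.1, l.2.2.1, l.2.2.2)], acc.2.2.2)
      else if l.2.1 = "/" then (acc.1, acc.2.1, acc.2.2.1, acc.2.2.2 ++ [(l.1, l.2.2.1, l.2.2.2)])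
      else acc) (p, m, t, d)
    = (p ++ selOp "+" eqs, m ++ selOp "-" eqs, t ++ selOp "x" eqs, d ++ selOp "/" eqs) := by
  induction eqs generalizing p m t d with
  | nil => simp [selOp]
  | cons l ls ih =>
    rw [List.foldl_cons]
    split_ifs with h1 h2 h3 h4 <;> rw [ih] <;> clear ih <;>
      simp_all [selOp]

theorem classify_eq (eqs : List (Int × String × Int × Int)) :
    classifyB eqs = (selOp "+" eqs, selOp "-" eqs, selOp "x" eqs, selOp "/" eqs) := by
  rw [classifyB, classify_aux]; simp

theorem any_sel (op : String) (eqs : List (Int × String × Int × Int)) (q : Int × Int × Int → Bool) :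
    (selOp op eqs).any q = eqs.any (fun l => (l.2.1 == op) && q (l.1, l.2.2.1, l.2.2.2)) := by
  induction eqs with
  | nil => rfl
  | cons l ls ih =>
    simp only [selOp, List.filterMap_cons] at *
    by_cases h : l.2.1 = op <;> simp [h, ih]

-- A's line list, computed on the destructured input
theorem sixLinesA_eq (a b c d e f g h i : Int) (o0 o1 o2 p0 p1 p2 : String)
    (r0 r1 r2 : List Int) (gs : List (List Int)) (ros cos : List String) :
    sixLinesA ((a::b::c::r0)::(d::e::f::r1)::(g::h::i::r2)::gs) (o0::o1::o2::ros) (p0::p1::p2::cos)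
    = [(a,o0,b,c),(d,o1,e,f),(g,o2,h,i),(a,p0,d,g),(b,p1,e,h),(c,p2,f,i)] := by
  have h3 : PySem.List.pyRange 0 3 1 = [0,1,2] := by decide
  simp [sixLinesA, h3, pvRowA, pvIntA, pvStrA, PySem.List.pyGet?_of_nonneg, List.foldl]

-- B's equation list is the same six lines
theorem eqsB_eq (a b c d e f g h i : Int) (o0 o1 o2 p0 p1 p2 : String)
    (r0 r1 r2 : List Int) (gs : List (List Int)) (ros cos : List String) :
    eqsB ((a::b::c::r0)::(d::e::f::r1)::(g::h::i::r2)::gs) (o0::o1::o2::ros) (p0::p1::p2::cos)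
    = [(a,o0,b,c),(d,o1,e,f),(g,o2,h,i),(a,p0,d,g),(b,p1,e,h),(c,p2,f,i)] := by
  simp [eqsB, pvTripleB, pvZip3B, List.take, List.zip]

-- A's index-driven double loop coincides with its structural form on six lines
theorem pairScanA_eq_pairStruct (l0 l1 l2 l3 l4 l5 : Int × String × Int × Int) :
    pairScanA [l0, l1, l2, l3, l4, l5] = pairStruct [l0, l1, l2, l3, l4, l5] := by
  have h0 : PySem.List.pyRange 0 6 1 = [0,1,2,3,4,5] := by decide
  have h1 : PySem.List.pyRange 1 6 1 = [1,2,3,4,5] := by decide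
  have h2 : PySem.List.pyRange 2 6 1 = [2,3,4,5] := by decide
  have h3 : PySem.List.pyRange 3 6 1 = [3,4,5] := by decide
  have h4 : PySem.List.pyRange 4 6 1 = [4,5] := by decide
  have h5 : PySem.List.pyRange 5 6 1 = [5] := by decide
  have h6 : PySem.List.pyRange 6 6 1 = [] := by decide
  simp [pairScanA, pairStruct, h0, h1, h2, h3, h4, h5, h6, List.any_cons]

-- ===== VERDICT =====
theorem has_any_mirrored_ops_py_spec : Claim_equal_has_any_mirrored_ops_py := by
  intro grid row_ops col_ops _ hpre
  obtain ⟨hg, hr, hc, hrows⟩ := hpre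
  obtain ⟨g0, g1, g2, gs, rfl⟩ : ∃ g0 g1 g2 gs, grid = g0 :: g1 :: g2 :: gs := by
    rcases grid with _ | ⟨g0, _ | ⟨g1, _ | ⟨g2, gs⟩⟩⟩ <;> simp_all
  obtain ⟨o0, o1, o2, ros, rfl⟩ : ∃ o0 o1 o2 ros, row_ops = o0 :: o1 :: o2 :: ros := by
    rcases row_ops with _ | ⟨o0, _ | ⟨o1, _ | ⟨o2, ros⟩⟩⟩ <;> simp_all
  obtain ⟨p0, p1, p2, cos, rfl⟩ : ∃ p0 p1 p2 cos, col_ops = p0 :: p1 :: p2 :: cos := by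
    rcases col_ops with _ | ⟨p0, _ | ⟨p1, _ | ⟨p2, cos⟩⟩⟩ <;> simp_all
  have h0 : 3 ≤ g0.length := hrows g0 (by simp)
  have h1 : 3 ≤ g1.length := hrows g1 (by simp)
  have h2 : 3 ≤ g2.length := hrows g2 (by simp)
  obtain ⟨a, b, c, r0, rfl⟩ : ∃ a b c r0, g0 = a :: b :: c :: r0 := by
    rcases g0 with _ | ⟨a, _ | ⟨b, _ | ⟨c, r0⟩⟩⟩ <;> simp_all
  obtain ⟨d, e, f, r1, rfl⟩ : ∃ d e f r1, g1 = d :: e :: f :: r1 := by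
    rcases g1 with _ | ⟨d, _ | ⟨e, _ | ⟨f, r1⟩⟩⟩ <;> simp_all
  obtain ⟨g, h, i, r2, rfl⟩ : ∃ g h i r2, g2 = g :: h :: i :: r2 := by
    rcases g2 with _ | ⟨g, _ | ⟨h, _ | ⟨i, r2⟩⟩⟩ <;> simp_all
  show has_any_mirrored_ops_py _ _ _ = _
  rw [has_any_mirrored_ops_py, sixLinesA_eq, pairScanA_eq_pairStruct, key]
  rw [has_any_mirrored_ops_py_alt]
  rw [eqsB_eq, classify_eq]
  simp only [any_sel, and_any]
  rfl
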